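-- pv_equiv track=rewrite | github.com/iofu728/ProgrammingCode | leetcode/100530.py | zigzagTraversal
-- ===== SOURCE A (Python) =====
-- from typing import List
--
-- def zigzagTraversal(grid: List[List[int]]) -> List[int]:
--     idx = 0
--     res = []
--     for ii in range(len(grid)):
--         if ii %2 == 0:
--             for jj in range(len(grid[0])):
--                 if idx % 2 == 0:
--                     res.append(grid[ii][jj])
--                 idx += 1
--         else:
--             for jj in range(len(grid[0]) - 1, -1, -1):
--                 if idx % 2 == 0:
--                     res.append(grid[ii][jj])
--                 idx += 1
--     return res
-- ===== SOURCE B (Python) =====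
-- from typing import List
--
-- def zigzagTraversal(grid: List[List[int]]) -> List[int]:
--     if not grid:
--         return []
--     w = len(grid[0])
--     flat = []
--     for i, row in enumerate(grid):
--         js = range(w) if i % 2 == 0 else range(w - 1, -1, -1)
--         flat.extend(row[j] for j in js)
--     return flat[::2]
-- ===== Notes on version B (the rewrite author's own statement) =====
-- stated objective: simpler
-- what changed: B replaces A's interleaved global index counter with parity test inside the nested loops by a two-pass decomposition: build the complete flattened zigzag list, then keep every other element with a stride-2 slice flat[::2].
-- outside the precondition, e.g. on zigzagTraversal([[1], []]): A returns [1], B raises IndexError; on zigzagTraversal([[1, 2], [3]]): A raises IndexError, B raises IndexError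
import Mathlib
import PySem

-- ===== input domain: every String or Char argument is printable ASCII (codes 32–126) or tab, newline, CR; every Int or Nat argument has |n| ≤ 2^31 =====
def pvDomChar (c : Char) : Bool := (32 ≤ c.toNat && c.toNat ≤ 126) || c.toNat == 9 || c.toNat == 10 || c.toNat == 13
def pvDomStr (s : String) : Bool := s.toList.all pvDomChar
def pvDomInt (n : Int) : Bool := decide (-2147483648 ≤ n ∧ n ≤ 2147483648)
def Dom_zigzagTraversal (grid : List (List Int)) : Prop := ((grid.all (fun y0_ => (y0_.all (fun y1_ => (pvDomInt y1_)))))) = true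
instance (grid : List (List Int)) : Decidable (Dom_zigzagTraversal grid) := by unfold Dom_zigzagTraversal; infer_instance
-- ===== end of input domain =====

-- B builds the whole zigzag-flattened list in one pass and then keeps every other element with a
-- stride-2 slice, instead of A's interleaved global index-parity counter (objective: simpler decomposition).

-- ===== PORT A =====
def zigzagTraversal (grid : List (List Int)) : List Int :=
  ((PySem.List.pyRange 0 grid.length 1).foldl
    (fun (st : Int × List Int) ii =>
      if PySem.Int.mod ii 2 = 0 then
        (PySem.List.pyRange 0 (((PySem.List.pyGet? grid 0).getD []).length : Int) 1).foldl
          (fun (st : Int × List Int) jj =>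
            (st.1 + 1,
             if PySem.Int.mod st.1 2 = 0 then
               st.2 ++ [((PySem.List.pyGet? grid ii).bind (fun row => PySem.List.pyGet? row jj)).getD 0]
             else st.2))
          st
      else
        (PySem.List.pyRange ((((PySem.List.pyGet? grid 0).getD []).length : Int) - 1) (-1) (-1)).foldl
          (fun (st : Int × List Int) jj =>
            (st.1 + 1,
             if PySem.Int.mod st.1 2 = 0 then
               st.2 ++ [((PySem.List.pyGet? grid ii).bind (fun row => PySem.List.pyGet? row jj)).getD 0]
             else st.2))
          st)
    ((0 : Int), ([] : List Int))).2

-- ===== PORT B =====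
def zigzagTraversal_alt (grid : List (List Int)) : List Int :=
  match grid with
  | [] => []
  | r0 :: _ =>
    let w : Int := r0.length
    let flat := (PySem.List.enumerate grid).foldl
      (fun (acc : List Int) (p : Int × List Int) =>
        let js := if PySem.Int.mod p.1 2 = 0 then PySem.List.pyRange 0 w 1
                  else PySem.List.pyRange (w - 1) (-1) (-1)
        acc ++ js.map (fun j => (PySem.List.pyGet? p.2 j).getD 0))
      []
    (PySem.List.slice? flat none none 2).getD []

-- ===== PRECONDITION & SPEC =====
-- Pre_ excludes ragged grids containing a row shorter than the first row: there Python A raises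
-- IndexError except when every missing cell happens to fall on an odd global index (A's parity
-- guard then skips it and A returns a value), while B, which materialises every cell of the
-- flattened zigzag before slicing, raises IndexError on all such grids.
def Pre_zigzagTraversal (grid : List (List Int)) : Prop :=
  ∀ row ∈ grid, (grid.headD []).length ≤ row.length
instance (grid : List (List Int)) : Decidable (Pre_zigzagTraversal grid) := by
  unfold Pre_zigzagTraversal; infer_instance
def pvWitness_zigzagTraversal : List (List Int) := [[1, 2, 3], [4, 5, 6], [7, 8, 9]]

def Spec_zigzagTraversal (grid : List (List Int)) (out : List Int) : Prop := out = zigzagTraversal_alt grid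
instance (grid : List (List Int)) (out : List Int) : Decidable (Spec_zigzagTraversal grid out) := by unfold Spec_zigzagTraversal; infer_instance

-- ===== CLAIM (what is proved, stated in full; the proofs are below) =====
def Claim_equal_zigzagTraversal : Prop := ∀ (grid : List (List Int)), Dom_zigzagTraversal grid → Pre_zigzagTraversal grid → Spec_zigzagTraversal grid (zigzagTraversal grid)

-- ===== LEMMAS AND PROOFS =====

-- every other element of a list, starting with the first
def pvEo : List Int → List Int
  | [] => []
  | [x] => [x]
  | x :: _ :: r => x :: pvEo r

-- the elements A's parity guard keeps when the global counter starts at i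
def pvPick (i : Int) (l : List Int) : List Int :=
  if PySem.Int.mod i 2 = 0 then pvEo l else pvEo l.tail

-- the column order of row i (ascending for even i, descending for odd i)
def pvJs (w : Nat) (i : Int) : List Int :=
  if PySem.Int.mod i 2 = 0 then PySem.List.pyRange 0 (w : Int) 1
  else PySem.List.pyRange ((w : Int) - 1) (-1) (-1)

-- the cell values contributed by row `row` at row index i
def pvRow (w : Nat) (i : Int) (row : List Int) : List Int :=
  (pvJs w i).map (fun j => (PySem.List.pyGet? row j).getD 0)

theorem pvMod2 (i : Int) : PySem.Int.mod i 2 = i % 2 :=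
  PySem.Int.mod_eq_emod_of_pos (by norm_num)

theorem pvEo_cons (x : Int) (l : List Int) : pvEo (x :: l) = x :: pvEo l.tail := by
  cases l <;> simp [pvEo]

theorem pvPick_nil (i : Int) : pvPick i [] = [] := by
  simp [pvPick, pvEo]

theorem pvPick_cons (i : Int) (x : Int) (l : List Int) :
    pvPick i (x :: l) = (if PySem.Int.mod i 2 = 0 then [x] else []) ++ pvPick (i + 1) l := by
  simp only [pvPick, pvMod2]
  rcases Int.emod_two_eq_zero_or_one i with h | h
  · have h1 : (i + 1) % 2 = 1 := by omega
    simp [h, h1, pvEo_cons]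
  · have h1 : (i + 1) % 2 = 0 := by omega
    simp [h, h1]

theorem pvPick_append (l1 l2 : List Int) : ∀ (i : Int),
    pvPick i (l1 ++ l2) = pvPick i l1 ++ pvPick (i + l1.length) l2 := by
  induction l1 with
  | nil => intro i; simp [pvPick_nil]
  | cons x l ih =>
    intro i
    simp only [List.cons_append, pvPick_cons, ih (i + 1), List.length_cons]
    have h : i + 1 + (l.length : Int) = i + ((l.length : Int) + 1) := by ring
    rw [h]
    split <;> simp

-- A's inner loop: the counter advances by the length, the kept cells are pvPick
theorem pvInner (g : Int → Int) (js : List Int) : ∀ (idx : Int) (res : List Int),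
    js.foldl
      (fun (st : Int × List Int) jj =>
        (st.1 + 1, if PySem.Int.mod st.1 2 = 0 then st.2 ++ [g jj] else st.2))
      (idx, res)
    = (idx + js.length, res ++ pvPick idx (js.map g)) := by
  induction js with
  | nil => intro idx res; simp [pvPick_nil]
  | cons j js ih =>
    intro idx res
    simp only [List.foldl_cons, List.map_cons, pvPick_cons, ih, List.length_cons, Prod.mk.injEq]
    constructor
    · push_cast; ring
    · split <;> simp

theorem pvRangeDesc (w : Nat) :
    PySem.List.pyRange ((w : Int) - 1) (-1) (-1) = (List.range w).reverse.map (fun k : Nat => (k : Int)) := by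
  cases w with
  | zero => simp [PySem.List.pyRange]
  | succ n =>
    have hc : PySem.List.pyRange (((n + 1 : Nat) : Int) - 1) (-1) (-1)
        = (List.range (n + 1)).map (fun k : Nat => (n : Int) - (k : Int)) := by
      simp only [PySem.List.pyRange]
      rw [if_neg (by omega : ¬ ((-1:Int) = 0))]
      rw [if_neg (by omega : ¬ ((0:Int) < -1))]
      rw [if_pos (by omega : (-1:Int) < ((n + 1 : Nat) : Int) - 1)]
      simp only [neg_neg]
      rw [show ((((n + 1 : Nat) : Int) - 1 - -1 + 1 - 1) / 1).toNat = n + 1 by omega]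
      apply List.map_congr_left
      intro k _
      omega
    rw [hc]
    apply List.ext_getElem
    · simp
    · intro k h1 h2
      simp only [List.length_map, List.length_range] at h1
      simp only [List.getElem_map, List.getElem_reverse, List.length_range,
        List.getElem_range]
      omega

theorem pvJs_length (w : Nat) (i : Int) : (pvJs w i).length = w := by
  unfold pvJs
  split
  · simp [PySem.List.pyRange_zero_natCast]
  · simp [pvRangeDesc]

theorem pvRow_length (w : Nat) (i : Int) (row : List Int) : (pvRow w i row).length = w := by
  simp [pvRow, pvJs_length]

-- A's outer loop over the first m row indices
theorem pvOuterA (grid : List (List Int)) (w : Nat) : ∀ (m : Nat), m ≤ grid.length →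
    ((List.range m).map (fun k : Nat => (k : Int))).foldl
      (fun (st : Int × List Int) ii =>
        if PySem.Int.mod ii 2 = 0 then
          (PySem.List.pyRange 0 (w : Int) 1).foldl
            (fun (st : Int × List Int) jj =>
              (st.1 + 1,
               if PySem.Int.mod st.1 2 = 0 then
                 st.2 ++ [((PySem.List.pyGet? grid ii).bind (fun row => PySem.List.pyGet? row jj)).getD 0]
               else st.2))
            st
        else
          (PySem.List.pyRange ((w : Int) - 1) (-1) (-1)).foldl
            (fun (st : Int × List Int) jj =>
              (st.1 + 1,
               if PySem.Int.mod st.1 2 = 0 then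
                 st.2 ++ [((PySem.List.pyGet? grid ii).bind (fun row => PySem.List.pyGet? row jj)).getD 0]
               else st.2))
            st)
      ((0 : Int), ([] : List Int))
    = (((m * w : Nat) : Int),
       pvPick 0 ((List.range m).flatMap (fun (i : Nat) => pvRow w (i : Int) (grid.getD i [])))) := by
  intro m
  induction m with
  | zero => intro _; simp [pvPick_nil]
  | succ m ih =>
    intro hm
    have hmlt : m < grid.length := by omega
    rw [List.range_succ, List.map_append, List.foldl_append, ih (by omega)]
    simp only [List.map_cons, List.map_nil, List.foldl_cons, List.foldl_nil]
    have hget : PySem.List.pyGet? grid (m : Int) = some (grid.getD m []) := by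
      rw [PySem.List.pyGet?_natCast, List.getElem?_eq_getElem hmlt, List.getD_eq_getElem _ _ hmlt]
    have hlen : ((List.range m).flatMap (fun (i : Nat) => pvRow w (i : Int) (grid.getD i []))).length
        = m * w := by
      rw [List.length_flatMap]
      rw [show (List.range m).map (fun (a : Nat) => (pvRow w (a : Int) (grid.getD a [])).length)
          = (List.range m).map (fun _ => w) from
        List.map_congr_left (fun i _ => pvRow_length w (i : Int) (grid.getD i []))]
      simp [mul_comm]
    rw [List.flatMap_append, List.flatMap_cons, List.flatMap_nil, List.append_nil,
        pvPick_append, hlen]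
    by_cases hpar : PySem.Int.mod (m : Int) 2 = 0
    · rw [if_pos hpar, pvInner]
      simp only [Prod.mk.injEq]
      constructor
      · simp only [PySem.List.pyRange_zero_natCast, List.length_map, List.length_range]
        push_cast; ring
      · rw [show pvRow w (m : Int) (grid.getD m [])
            = (PySem.List.pyRange 0 (w : Int) 1).map
                (fun jj => ((PySem.List.pyGet? grid (m : Int)).bind (fun row => PySem.List.pyGet? row jj)).getD 0) from by
          unfold pvRow pvJs
          rw [if_pos hpar]
          exact (List.map_congr_left (fun j _ => by rw [hget]; rfl)).symm]
        norm_num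
    · rw [if_neg hpar, pvInner]
      simp only [Prod.mk.injEq]
      constructor
      · simp only [pvRangeDesc, List.length_map, List.length_reverse, List.length_range]
        push_cast; ring
      · rw [show pvRow w (m : Int) (grid.getD m [])
            = (PySem.List.pyRange ((w : Int) - 1) (-1) (-1)).map
                (fun jj => ((PySem.List.pyGet? grid (m : Int)).bind (fun row => PySem.List.pyGet? row jj)).getD 0) from by
          unfold pvRow pvJs
          rw [if_neg hpar]
          exact (List.map_congr_left (fun j _ => by rw [hget]; rfl)).symm]
        norm_num

-- B's flattening pass over `enumerate`, as a range-indexed flatten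
theorem pvEnumFlat (w : Nat) : ∀ (xs : List (List Int)) (k : Int),
    (PySem.List.enumerate xs k).flatMap (fun p => pvRow w p.1 p.2)
    = (List.range xs.length).flatMap (fun (i : Nat) => pvRow w (k + (i : Int)) (xs.getD i [])) := by
  intro xs
  induction xs with
  | nil => intro k; simp [PySem.List.enumerate]
  | cons r rs ih =>
    intro k
    show pvRow w k r ++ (PySem.List.enumerate rs (k + 1)).flatMap (fun p => pvRow w p.1 p.2) = _
    rw [ih (k + 1), List.length_cons, List.range_succ_eq_map, List.flatMap_cons, List.flatMap_map]
    congr 1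
    · simp
    · refine List.flatMap_congr fun i _ => ?_
      simp only [List.getD_cons_succ]
      congr 1
      push_cast
      ring

theorem pvEnumFlat0 (w : Nat) (xs : List (List Int)) :
    (PySem.List.enumerate xs 0).flatMap (fun p => pvRow w p.1 p.2)
    = (List.range xs.length).flatMap (fun (i : Nat) => pvRow w (i : Int) (xs.getD i [])) := by
  have h := pvEnumFlat w xs 0
  simp only [zero_add] at h
  exact h

-- the stride-2 slice keeps exactly every other element
theorem pvEoIdx : ∀ (xs : List Int),
    (List.range ((xs.length + 1) / 2)).filterMap (fun k => xs[2 * k]?) = pvEo xs := by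
  intro xs
  induction xs using pvEo.induct with
  | case1 => simp [pvEo]
  | case2 x => simp [pvEo, List.range_succ]
  | case3 x y r ih =>
    have hc : (((x :: y :: r).length + 1) / 2) = (r.length + 1) / 2 + 1 := by simp; omega
    rw [hc, List.range_succ_eq_map, List.filterMap_cons, List.filterMap_map]
    simp only [Nat.mul_zero, List.getElem?_cons_zero]
    rw [show ((fun k => (x :: y :: r)[2 * k]?) ∘ Nat.succ) = (fun k => r[2 * k]?) from by
      funext k
      simp only [Function.comp]
      rw [show 2 * Nat.succ k = (2 * k) + 1 + 1 from by omega]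
      simp]
    rw [ih]
    simp [pvEo]

theorem pvSliceTwo (xs : List Int) :
    (PySem.List.slice? xs none none 2).getD [] = pvEo xs := by
  simp only [PySem.List.slice?, PySem.List.sliceIndices]
  norm_num
  rw [show (fun x : Nat => xs[(2 * (x : Int)).toNat]?) = (fun k : Nat => xs[2 * k]?) from by
    funext k; rw [show (2 * ((k : Nat) : Int)).toNat = 2 * k from by omega]]
  rw [show (if 0 < xs.length then (((xs.length : Int) + 2 - 1) / 2).toNat else 0)
      = (xs.length + 1) / 2 from by split <;> omega]
  exact pvEoIdx xs

theorem pvPick_zero (l : List Int) : pvPick 0 l = pvEo l := by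
  simp [pvPick]

theorem pvMain (grid : List (List Int)) : zigzagTraversal grid = zigzagTraversal_alt grid := by
  cases grid with
  | nil => rfl
  | cons r0 rest =>
    have hw : ((PySem.List.pyGet? (r0 :: rest) 0).getD []).length = r0.length := by
      rw [PySem.List.pyGet?_zero_cons]; rfl
    unfold zigzagTraversal
    rw [hw,
        show PySem.List.pyRange 0 (((r0 :: rest).length : Nat) : Int) 1
            = (List.range (r0 :: rest).length).map (fun k : Nat => (k : Int)) from
          PySem.List.pyRange_zero_natCast _,
        pvOuterA (r0 :: rest) r0.length (r0 :: rest).length le_rfl]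
    show pvPick 0 _ = zigzagTraversal_alt (r0 :: rest)
    rw [show zigzagTraversal_alt (r0 :: rest)
        = (PySem.List.slice?
            ((PySem.List.enumerate (r0 :: rest) 0).foldl
              (fun (acc : List Int) (p : Int × List Int) => acc ++ pvRow r0.length p.1 p.2) [])
            none none 2).getD [] from rfl]
    rw [PySem.List.foldl_append_eq_flatMap, List.nil_append, pvSliceTwo, pvEnumFlat0, pvPick_zero]

-- ===== VERDICT (by name: the statement is the Claim_ definition above) =====
theorem zigzagTraversal_spec : Claim_equal_zigzagTraversal := by
  intro grid _ _
  unfold Spec_zigzagTraversal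
  exact pvMain grid
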